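-- pv_equiv track=rewrite | github.com/Neo2481/lordflix-decrypt | standalone/wasm_deep_analyze.py | read_sleb128
-- ===== SOURCE A (Python) =====
-- def read_sleb128(data, pos):
--     """Read signed LEB128 value"""
--     result = 0
--     shift = 0
--     while pos < len(data):
--         byte = data[pos]; pos += 1
--         result |= (byte & 0x7f) << shift; shift += 7
--         if not (byte & 0x80):
--             if byte & 0x40:
--                 result |= -(1 << shift)
--             break
--     return result, pos
-- ===== SOURCE B (Python) =====
-- def read_sleb128(data, pos):
--     """Read signed LEB128 value (two-pass: collect 7-bit chunks, then combine)"""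
--     chunks = []
--     term = None
--     while pos < len(data):
--         byte = data[pos]
--         pos += 1
--         chunks.append(byte & 0x7f)
--         if not (byte & 0x80):
--             term = byte
--             break
--     result = 0
--     for i, c in enumerate(chunks):
--         result |= c << (7 * i)
--     if term is not None and term & 0x40:
--         result |= -(1 << (7 * len(chunks)))
--     return result, pos
-- ===== Notes on version B (the rewrite author's own statement) =====
-- stated objective: alternative
-- what changed: A's single fused loop that ORs each chunk into the result while tracking a shift accumulator is split into two passes: first collect the low-7-bit chunks (and the terminating byte) while advancing pos, then fold the chunks into the result with shifts 7*i from enumerate and sign-extend by 7*len(chunks) only if a terminator with bit 0x40 was found.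
import Mathlib
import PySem

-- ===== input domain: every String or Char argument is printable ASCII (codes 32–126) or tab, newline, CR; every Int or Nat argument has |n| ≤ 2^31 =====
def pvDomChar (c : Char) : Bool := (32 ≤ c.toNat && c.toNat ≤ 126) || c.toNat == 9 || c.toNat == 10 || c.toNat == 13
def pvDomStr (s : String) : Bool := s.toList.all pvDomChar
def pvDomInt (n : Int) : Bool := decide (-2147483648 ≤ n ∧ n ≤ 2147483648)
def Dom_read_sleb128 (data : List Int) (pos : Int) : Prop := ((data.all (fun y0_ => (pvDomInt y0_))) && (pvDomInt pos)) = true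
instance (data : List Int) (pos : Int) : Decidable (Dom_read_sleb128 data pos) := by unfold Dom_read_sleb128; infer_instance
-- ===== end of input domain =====

-- B re-decomposes A's fused read/combine loop into two passes (collect the 7-bit chunks,
-- then fold them into the result and sign-extend); same return value, alternative structure.

-- ===== PORT A =====
-- A's while loop: state (result, shift, pos); shift stays ≥ 0, so '<<< shift.toNat' is exact
-- for Python's '<< shift'. 'data[pos]' is pyGet?; the .getD 0 arm is the IndexError case,
-- excluded by Pre_.
def readGoA (data : List Int) (result shift pos : Int) : Int × Int :=
  if h : pos < data.length then
    let byte := (PySem.List.pyGet? data pos).getD 0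
    let result' := PySem.Int.bor result (PySem.Int.band byte 0x7f <<< shift.toNat)
    let shift' := shift + 7
    if PySem.Int.band byte 0x80 == 0 then
      if PySem.Int.band byte 0x40 != 0 then
        (PySem.Int.bor result' (-(1 <<< shift'.toNat)), pos + 1)
      else (result', pos + 1)
    else readGoA data result' shift' (pos + 1)
  else (result, pos)
termination_by (data.length - pos).toNat
decreasing_by omega

def read_sleb128 (data : List Int) (pos : Int) : Int × Int :=
  readGoA data 0 0 pos

-- ===== PORT B =====
-- first pass: collect the low-7-bit chunks (appending, as Source B does), the terminating byte
-- (if any) and the final pos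
def readCollect (data : List Int) (pos : Int) (chunks : List Int) :
    List Int × Option Int × Int :=
  if h : pos < data.length then
    let byte := (PySem.List.pyGet? data pos).getD 0
    let chunks' := chunks ++ [PySem.Int.band byte 0x7f]
    if PySem.Int.band byte 0x80 == 0 then (chunks', some byte, pos + 1)
    else readCollect data (pos + 1) chunks'
  else (chunks, none, pos)
termination_by (data.length - pos).toNat
decreasing_by omega

def read_sleb128_alt (data : List Int) (pos : Int) : Int × Int :=
  let (chunks, term, pos') := readCollect data pos []
  let result := (PySem.List.enumerate chunks).foldl
    (fun r ic => PySem.Int.bor r (ic.2 <<< (7 * ic.1).toNat)) 0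
  let result :=
    match term with
    | some t => if PySem.Int.band t 0x40 != 0 then
        PySem.Int.bor result (-(1 <<< (7 * chunks.length))) else result
    | none => result
  (result, pos')

-- ===== PRECONDITION & SPEC =====
-- Pre_ excludes exactly pos < -len(data), where Python's data[pos] raises IndexError in A (and in B).
def Pre_read_sleb128 (data : List Int) (pos : Int) : Prop := -(data.length : Int) ≤ pos
instance (data : List Int) (pos : Int) : Decidable (Pre_read_sleb128 data pos) := by
  unfold Pre_read_sleb128; infer_instance

def pvWitness_read_sleb128 : List Int × Int := ([0xE5, 0x8E, 0x26, 0x7f], 0)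

def Spec_read_sleb128 (data : List Int) (pos : Int) (out : Int × Int) : Prop := out = read_sleb128_alt data pos
instance (data : List Int) (pos : Int) (out : Int × Int) : Decidable (Spec_read_sleb128 data pos out) := by unfold Spec_read_sleb128; infer_instance

-- ===== CLAIM (what is proved, stated in full; the proofs are below) =====
def Claim_equal_read_sleb128 : Prop := ∀ (data : List Int) (pos : Int), Dom_read_sleb128 data pos → Pre_read_sleb128 data pos → Spec_read_sleb128 data pos (read_sleb128 data pos)

-- ===== LEMMAS AND PROOFS =====

-- proof-side accumulator: B's combining pass, written with an explicit shift accumulator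
def combineGo (r s : Int) : List Int → Int × Int
  | [] => (r, s)
  | c :: cs => combineGo (PySem.Int.bor r (c <<< s.toNat)) (s + 7) cs

theorem combineGo_snd (cs : List Int) (r s : Int) : (combineGo r s cs).2 = s + 7 * cs.length := by
  induction cs generalizing r s with
  | nil => simp [combineGo]
  | cons c cs ih => simp [combineGo, ih]; ring

-- B's enumerate-fold equals combineGo's first component (shift = 7 * index)
theorem enumFold_eq_combineGo (cs : List Int) (k : Nat) (r : Int) :
    (PySem.List.enumerate cs (k : Int)).foldl
      (fun r ic => PySem.Int.bor r (ic.2 <<< (7 * ic.1).toNat)) r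
      = (combineGo r (7 * k) cs).1 := by
  induction cs generalizing k r with
  | nil => simp [combineGo, PySem.List.enumerate_nil]
  | cons c cs ih =>
    rw [PySem.List.enumerate_cons]
    simp only [List.foldl_cons, combineGo]
    have h1 : ((k : Int) + 1) = ((k + 1 : Nat) : Int) := by push_cast; ring
    rw [h1, ih]
    congr 2

-- B's finishing step (sign extension), on combineGo's final (result, shift) state
def finishB (rs : Int × Int) (t : Option Int) : Int :=
  match t with
  | some b => if PySem.Int.band b 0x40 != 0 then PySem.Int.bor rs.1 (-(1 <<< rs.2.toNat)) else rs.1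
  | none => rs.1

-- collecting into an accumulator = accumulator ++ collecting into []
theorem readCollect_acc (data : List Int) : ∀ (n : Nat) (pos : Int), (data.length - pos).toNat ≤ n →
    ∀ acc, readCollect data pos acc =
      (acc ++ (readCollect data pos []).1, (readCollect data pos []).2) := by
  intro n
  induction n with
  | zero =>
    intro pos h acc
    rw [readCollect, readCollect]
    split
    · omega
    · simp
  | succ n ih =>
    intro pos h acc
    rw [readCollect, readCollect]
    split
    · next hlt =>
      simp only []
      split
      · simp
      · simp only [List.nil_append]
        rw [ih (pos + 1) (by omega), ih (pos + 1) (by omega) ([_])]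
        simp
    · simp

-- the central bisimulation: A's fused loop equals collect-then-combine-then-finish
theorem goA_eq_collect (data : List Int) : ∀ (n : Nat) (pos r s : Int), (data.length - pos).toNat ≤ n →
    readGoA data r s pos =
      (finishB (combineGo r s (readCollect data pos []).1) (readCollect data pos []).2.1,
       (readCollect data pos []).2.2) := by
  intro n
  induction n with
  | zero =>
    intro pos r s h
    rw [readGoA, readCollect]
    split
    · omega
    · simp [combineGo, finishB]
  | succ n ih =>
    intro pos r s h
    rw [readGoA, readCollect]
    split
    · next hlt =>
      simp only []
      split
      · next hbreak =>
        simp only [List.nil_append, combineGo, finishB]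
        split <;> rfl
      · next hcont =>
        simp only [List.nil_append]
        rw [ih (pos + 1) _ _ (by omega),
            readCollect_acc data n (pos + 1) (by omega) [_]]
        simp [combineGo]
    · simp [combineGo, finishB]

theorem read_sleb128_spec : Claim_equal_read_sleb128 := by
  intro data pos _ _
  unfold Spec_read_sleb128 read_sleb128 read_sleb128_alt
  rw [goA_eq_collect data (data.length - pos).toNat pos 0 0 (by omega)]
  rcases hc : readCollect data pos [] with ⟨cs, t, p⟩
  have he := enumFold_eq_combineGo cs 0 0
  norm_num at he
  simp only [finishB, he]
  rcases t with _ | b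
  · simp
  · have hs := combineGo_snd cs 0 0
    simp only []
    split
    · have h2 : (combineGo 0 0 cs).2.toNat = 7 * cs.length := by omega
      rw [h2]
    · rfl
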